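-- pv_equiv track=rewrite | github.com/Anthonyooo0/Linked-in-easy-apply-bot | automation ai/test_field_detection.py | get_smart_fallback
-- ===== SOURCE A (Python) =====
-- def get_smart_fallback(question: str) -> str:
--     """Provide context-aware fallback answers based on question content"""
--     q_lower = question.lower()
--
--     if any(word in q_lower for word in ["year", "experience", "salary", "number"]):
--         return "0"
--     elif any(word in q_lower for word in ["authorized", "eligible", "legal"]):
--         return "Yes"
--     elif any(word in q_lower for word in ["sponsor", "visa", "h1b"]):
--         return "No"
--     elif any(word in q_lower for word in ["relocate", "move", "willing"]):
--         return "Yes"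
--     elif any(word in q_lower for word in ["start", "available", "notice"]):
--         return "Immediately"
--     elif any(word in q_lower for word in ["degree", "education", "university"]):
--         return "Bachelor's Degree"
--     elif any(word in q_lower for word in ["cover letter", "why", "interest"]):
--         return "I am excited about this opportunity and believe my skills align well with the requirements."
--     else:
--         return "Yes"
-- ===== SOURCE B (Python) =====
-- _TABLE = [
--     ("year", 0), ("experience", 0), ("salary", 0), ("number", 0),
--     ("authorized", 1), ("eligible", 1), ("legal", 1),
--     ("sponsor", 2), ("visa", 2), ("h1b", 2),
--     ("relocate", 3), ("move", 3), ("willing", 3),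
--     ("start", 4), ("available", 4), ("notice", 4),
--     ("degree", 5), ("education", 5), ("university", 5),
--     ("cover letter", 6), ("why", 6), ("interest", 6),
-- ]
--
-- _ANSWERS = [
--     "0", "Yes", "No", "Yes", "Immediately", "Bachelor's Degree",
--     "I am excited about this opportunity and believe my skills align well with the requirements.",
--     "Yes",  # default when no keyword matches
-- ]
--
--
-- def get_smart_fallback(question: str) -> str:
--     q = question.lower()
--     best = len(_ANSWERS) - 1
--     for kw, g in _TABLE:
--         if g < best and kw in q:
--             best = g
--     return _ANSWERS[best]
-- ===== Notes on version B (the rewrite author's own statement) =====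
-- stated objective: alternative
-- what changed: Replaces A's seven-branch if/elif cascade of any()-membership tests by a single argmin pass over a flat (keyword, priority) table followed by an answer-array lookup.
import Mathlib
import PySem

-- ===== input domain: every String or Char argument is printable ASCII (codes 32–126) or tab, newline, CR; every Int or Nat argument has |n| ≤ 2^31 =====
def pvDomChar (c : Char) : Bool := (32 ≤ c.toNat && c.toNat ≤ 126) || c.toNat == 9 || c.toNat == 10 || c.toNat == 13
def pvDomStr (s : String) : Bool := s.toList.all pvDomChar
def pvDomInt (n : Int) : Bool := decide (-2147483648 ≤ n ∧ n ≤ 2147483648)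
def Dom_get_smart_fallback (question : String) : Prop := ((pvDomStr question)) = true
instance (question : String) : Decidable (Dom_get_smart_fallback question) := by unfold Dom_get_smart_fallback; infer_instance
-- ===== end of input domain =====

-- B replaces A's cascade of any()-guarded branches by a single argmin pass over a flat
-- (keyword, priority) table plus an answer array lookup (objective: alternative, same cost).

-- ===== PORT A =====
def get_smart_fallback (question : String) : String :=
  let q := PySem.Str.lower question
  if ["year", "experience", "salary", "number"].any (fun w => PySem.Str.isIn w q) then "0"
  else if ["authorized", "eligible", "legal"].any (fun w => PySem.Str.isIn w q) then "Yes"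
  else if ["sponsor", "visa", "h1b"].any (fun w => PySem.Str.isIn w q) then "No"
  else if ["relocate", "move", "willing"].any (fun w => PySem.Str.isIn w q) then "Yes"
  else if ["start", "available", "notice"].any (fun w => PySem.Str.isIn w q) then "Immediately"
  else if ["degree", "education", "university"].any (fun w => PySem.Str.isIn w q) then "Bachelor's Degree"
  else if ["cover letter", "why", "interest"].any (fun w => PySem.Str.isIn w q) then
    "I am excited about this opportunity and believe my skills align well with the requirements."
  else "Yes"

-- ===== PORT B =====
def pvTable : List (String × Nat) :=
  [("year", 0), ("experience", 0), ("salary", 0), ("number", 0),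
   ("authorized", 1), ("eligible", 1), ("legal", 1),
   ("sponsor", 2), ("visa", 2), ("h1b", 2),
   ("relocate", 3), ("move", 3), ("willing", 3),
   ("start", 4), ("available", 4), ("notice", 4),
   ("degree", 5), ("education", 5), ("university", 5),
   ("cover letter", 6), ("why", 6), ("interest", 6)]

def pvAnswers : List String :=
  ["0", "Yes", "No", "Yes", "Immediately", "Bachelor's Degree",
   "I am excited about this opportunity and believe my skills align well with the requirements.",
   "Yes"]

def get_smart_fallback_alt (question : String) : String :=
  let q := PySem.Str.lower question
  let best := pvTable.foldl
    (fun b p => if p.2 < b ∧ PySem.Str.isIn p.1 q = true then p.2 else b)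
    (pvAnswers.length - 1)
  -- best < pvAnswers.length always (it only decreases from 7), so getD is exact for _ANSWERS[best]
  pvAnswers.getD best ""

-- ===== PRECONDITION & SPEC =====
def Spec_get_smart_fallback (question : String) (out : String) : Prop := out = get_smart_fallback_alt question
instance (question : String) (out : String) : Decidable (Spec_get_smart_fallback question out) := by unfold Spec_get_smart_fallback; infer_instance

-- ===== CLAIM (what is proved, stated in full; the proofs are below) =====
def Claim_equal_get_smart_fallback : Prop := ∀ (question : String), Dom_get_smart_fallback question → Spec_get_smart_fallback question (get_smart_fallback question)

-- ===== LEMMAS AND PROOFS =====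

-- the flat table is the concatenation of the seven constant-priority groups
theorem pvTable_split :
    pvTable =
      (["year", "experience", "salary", "number"].map (fun k => (k, 0)))
      ++ (["authorized", "eligible", "legal"].map (fun k => (k, 1)))
      ++ (["sponsor", "visa", "h1b"].map (fun k => (k, 2)))
      ++ (["relocate", "move", "willing"].map (fun k => (k, 3)))
      ++ (["start", "available", "notice"].map (fun k => (k, 4)))
      ++ (["degree", "education", "university"].map (fun k => (k, 5)))
      ++ (["cover letter", "why", "interest"].map (fun k => (k, 6))) := rfl

-- folding the argmin step over one constant-priority group, for any containment test c
theorem fold_group (c : String → Bool) (ks : List String) (g best : Nat) :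
    List.foldl (fun b (p : String × Nat) => if p.2 < b ∧ c p.1 = true then p.2 else b)
      best (ks.map (fun k => (k, g)))
    = if g < best ∧ (ks.any fun k => c k) = true then g else best := by
  induction ks generalizing best with
  | nil => simp
  | cons k ks ih =>
    simp only [List.map_cons, List.foldl_cons, List.any_cons]
    by_cases h1 : g < best
    · by_cases h2 : c k = true
      · simp [h1, h2, ih]
      · simp [h1, h2, ih]
    · simp [h1, ih]

-- ===== VERDICT (by name: the statement is the Claim_ definition above) =====
theorem get_smart_fallback_spec : Claim_equal_get_smart_fallback := by
  unfold Claim_equal_get_smart_fallback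
  intro question _
  unfold Spec_get_smart_fallback
  simp only [get_smart_fallback, get_smart_fallback_alt]
  rw [pvTable_split]
  simp only [List.foldl_append,
    fold_group (fun k => PySem.Str.isIn k (PySem.Str.lower question)),
    List.any_cons, List.any_nil, Bool.or_false]
  generalize PySem.Str.isIn "year" (PySem.Str.lower question) = a1
  generalize PySem.Str.isIn "experience" (PySem.Str.lower question) = a2
  generalize PySem.Str.isIn "salary" (PySem.Str.lower question) = a3
  generalize PySem.Str.isIn "number" (PySem.Str.lower question) = a4
  generalize PySem.Str.isIn "authorized" (PySem.Str.lower question) = b1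
  generalize PySem.Str.isIn "eligible" (PySem.Str.lower question) = b2
  generalize PySem.Str.isIn "legal" (PySem.Str.lower question) = b3
  generalize PySem.Str.isIn "sponsor" (PySem.Str.lower question) = c1
  generalize PySem.Str.isIn "visa" (PySem.Str.lower question) = c2
  generalize PySem.Str.isIn "h1b" (PySem.Str.lower question) = c3
  generalize PySem.Str.isIn "relocate" (PySem.Str.lower question) = d1
  generalize PySem.Str.isIn "move" (PySem.Str.lower question) = d2
  generalize PySem.Str.isIn "willing" (PySem.Str.lower question) = d3
  generalize PySem.Str.isIn "start" (PySem.Str.lower question) = e1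
  generalize PySem.Str.isIn "available" (PySem.Str.lower question) = e2
  generalize PySem.Str.isIn "notice" (PySem.Str.lower question) = e3
  generalize PySem.Str.isIn "degree" (PySem.Str.lower question) = f1
  generalize PySem.Str.isIn "education" (PySem.Str.lower question) = f2
  generalize PySem.Str.isIn "university" (PySem.Str.lower question) = f3
  generalize PySem.Str.isIn "cover letter" (PySem.Str.lower question) = g1
  generalize PySem.Str.isIn "why" (PySem.Str.lower question) = g2
  generalize PySem.Str.isIn "interest" (PySem.Str.lower question) = g3
  by_cases h0 : (a1 || (a2 || (a3 || a4))) = true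
  · simp [pvAnswers, h0]
  · by_cases h1 : (b1 || (b2 || b3)) = true
    · simp [pvAnswers, h0, h1]
    · by_cases h2 : (c1 || (c2 || c3)) = true
      · simp [pvAnswers, h0, h1, h2]
      · by_cases h3 : (d1 || (d2 || d3)) = true
        · simp [pvAnswers, h0, h1, h2, h3]
        · by_cases h4 : (e1 || (e2 || e3)) = true
          · simp [pvAnswers, h0, h1, h2, h3, h4]
          · by_cases h5 : (f1 || (f2 || f3)) = true
            · simp [pvAnswers, h0, h1, h2, h3, h4, h5]
            · by_cases h6 : (g1 || (g2 || g3)) = true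
              · simp [pvAnswers, h0, h1, h2, h3, h4, h5, h6]
              · simp [pvAnswers, h0, h1, h2, h3, h4, h5, h6]
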